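-- pv_equiv track=rewrite | github.com/Duwo/advent_of_code | 4/password.py | is_password
-- ===== SOURCE A (Python) =====
-- def is_password(password):
--     password_str = str(password)
--     bad_digit = None
--     for i, digit in enumerate(password_str):
--         if digit == bad_digit:
--             continue
--
--         try:
--             if password_str[i] == password_str[i+1] and password_str[i] == password_str[i+2]:
--                 bad_digit = password_str[i]
--                 continue
--             if password_str[i] == password_str[i+1]:
--                 return True
--         except IndexError:
--             try:
--                 if (password_str[i] == password_str[i+1]):
--                     return True
--             except IndexError:
--                 pass
--
--     return False
-- ===== SOURCE B (Python) =====
-- from itertools import groupby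
--
-- def is_password(password):
--     bad_digit = None
--     for digit, group in groupby(str(password)):
--         if digit == bad_digit:
--             continue
--         run = len(list(group))
--         if run >= 3:
--             bad_digit = digit
--         elif run == 2:
--             return True
--     return False
-- ===== Notes on version B (the rewrite author's own statement) =====
-- stated objective: simpler
-- what changed: Replaces A's index-based scan with neighbor lookups guarded by nested try/except by a single pass over itertools.groupby run-length groups, keeping A's persistent bad_digit state.
import Mathlib
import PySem

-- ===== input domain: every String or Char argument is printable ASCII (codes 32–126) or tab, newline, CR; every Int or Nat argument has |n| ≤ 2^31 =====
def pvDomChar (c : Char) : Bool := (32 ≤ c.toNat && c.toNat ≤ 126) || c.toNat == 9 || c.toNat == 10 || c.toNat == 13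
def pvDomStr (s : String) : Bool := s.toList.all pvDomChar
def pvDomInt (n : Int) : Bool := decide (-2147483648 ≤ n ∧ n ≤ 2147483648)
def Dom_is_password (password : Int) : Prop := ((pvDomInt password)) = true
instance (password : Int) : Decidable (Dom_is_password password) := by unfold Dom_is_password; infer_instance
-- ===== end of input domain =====

-- B replaces A's index-based scan with try/except by a single pass over itertools.groupby run-length
-- groups, keeping A's persistent bad_digit variable (objective: simpler).

-- ===== PORT A =====
-- A's for-loop over enumerate(str(password)) with indices i, i+1, i+2; IndexError becomes getElem? = none,
-- and the short-circuit of `and` is kept (s[i+2] only read when s[i] == s[i+1]).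
def isPwLoop (s : List Char) (i : Nat) (bad : Option Char) : Bool :=
  if h : i < s.length then
    let digit := s[i]
    if some digit = bad then isPwLoop s (i + 1) bad
    else
      match s[i+1]? with
      | none => isPwLoop s (i + 1) bad               -- both try-blocks raise IndexError: pass
      | some d1 =>
        if digit = d1 then
          match s[i+2]? with
          | some d2 =>
            if digit = d2 then isPwLoop s (i + 1) (some digit)   -- triple: bad_digit = digit; continue
            else true                                            -- pair: return True
          | none => true                             -- i+2 raises: except re-checks the pair: return True
        else isPwLoop s (i + 1) bad
  else false
termination_by s.length - i

def is_password (password : Int) : Bool :=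
  isPwLoop (PySem.Int.toStr password).toList 0 none

-- ===== PORT B =====
-- itertools.groupby(str(password)) as run-length groups (digit, run length)
def pwRuns : List Char → List (Char × Nat)
  | [] => []
  | c :: rest =>
    (c, 1 + (rest.takeWhile (· == c)).length) :: pwRuns (rest.dropWhile (· == c))
termination_by l => l.length
decreasing_by
  exact Nat.lt_succ_of_le (List.length_dropWhile_le _ _)

def pwGroupLoop : List (Char × Nat) → Option Char → Bool
  | [], _ => false
  | (digit, run) :: t, bad =>
    if some digit = bad then pwGroupLoop t bad
    else if 3 ≤ run then pwGroupLoop t (some digit)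
    else if run = 2 then true
    else pwGroupLoop t bad

def is_password_alt (password : Int) : Bool :=
  pwGroupLoop (pwRuns (PySem.Int.toStr password).toList) none

-- ===== PRECONDITION & SPEC =====
def Spec_is_password (password : Int) (out : Bool) : Prop := out = is_password_alt password
instance (password : Int) (out : Bool) : Decidable (Spec_is_password password out) := by unfold Spec_is_password; infer_instance

-- ===== CLAIM (what is proved, stated in full; the proofs are below) =====
def Claim_equal_is_password : Prop := ∀ (password : Int), Dom_is_password password → Spec_is_password password (is_password password)

-- ===== LEMMAS AND PROOFS =====

-- A's loop rewritten as a recursion on the suffix of the string starting at i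
def pwTail : List Char → Option Char → Bool
  | [], _ => false
  | [_], _ => false
  | [c, d1], bad =>
    if some c = bad then pwTail [d1] bad
    else if c = d1 then true
    else pwTail [d1] bad
  | c :: d1 :: d2 :: r, bad =>
    if some c = bad then pwTail (d1 :: d2 :: r) bad
    else if c = d1 then
      (if c = d2 then pwTail (d1 :: d2 :: r) (some c) else true)
    else pwTail (d1 :: d2 :: r) bad

theorem isPwLoop_eq_pwTail : ∀ (l : List Char) (s : List Char) (i : Nat) (bad : Option Char),
    s.drop i = l → isPwLoop s i bad = pwTail l bad := by
  intro l
  induction l with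
  | nil =>
    intro s i bad hd
    have hle : s.length ≤ i := List.drop_eq_nil_iff.mp hd
    rw [isPwLoop]
    simp [Nat.not_lt.mpr hle, pwTail]
  | cons c rest ih =>
    intro s i bad hd
    have hk : ∀ k, s[i + k]? = (c :: rest)[k]? := by
      intro k; rw [← hd, List.getElem?_drop]
    have h0 : s[i]? = some c := by have := hk 0; simpa using this
    have hi : i < s.length := by
      by_contra hc
      rw [List.getElem?_eq_none (by omega)] at h0; simp at h0
    have hci : s[i] = c := by
      rw [List.getElem?_eq_getElem hi] at h0; simpa using h0
    have hd' : s.drop (i + 1) = rest := by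
      have := List.tail_drop (l := s) (i := i)
      rw [hd] at this; simpa using this.symm
    have IH : ∀ b, isPwLoop s (i + 1) b = pwTail rest b := fun b => ih s (i + 1) b hd'
    have h1 : s[i + 1]? = rest[0]? := hk 1
    have h2 : s[i + 2]? = rest[1]? := hk 2
    rw [isPwLoop]
    simp only [hi, dif_pos, hci]
    by_cases hbad : some c = bad
    · rw [if_pos hbad, IH]
      rcases rest with _ | ⟨d1, t⟩
      · simp [pwTail]
      · rcases t with _ | ⟨d2, r⟩ <;> simp [pwTail, hbad]
    · rw [if_neg hbad]
      rcases rest with _ | ⟨d1, t⟩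
      · have hn : s[i + 1]? = none := by rw [h1]; rfl
        rw [hn, IH]
        simp [pwTail]
      · have hs1 : s[i + 1]? = some d1 := by rw [h1]; rfl
        rw [hs1]
        rcases t with _ | ⟨d2, r⟩
        · have hn2 : s[i + 2]? = none := by rw [h2]; rfl
          rw [hn2]
          by_cases hcd : c = d1
          · subst hcd; simp [pwTail, hbad]
          · simp [pwTail, hbad, hcd, IH]
        · have hs2 : s[i + 2]? = some d2 := by rw [h2]; rfl
          rw [hs2]
          by_cases hcd : c = d1
          · subst hcd
            by_cases hcd2 : c = d2
            · subst hcd2; simp [pwTail, hbad, IH]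
            · simp [pwTail, hbad, hcd2]
          · simp [pwTail, hbad, hcd, IH]

-- characters equal to the current bad digit are skipped one by one = dropped as a block
theorem pwTail_skip (c : Char) (l : List Char) :
    pwTail (c :: l) (some c) = pwTail l (some c) := by
  rcases l with _ | ⟨d1, t⟩
  · rfl
  · rcases t with _ | ⟨d2, r⟩ <;> simp [pwTail]

theorem pwTail_dropWhile (c : Char) :
    ∀ l : List Char, pwTail l (some c) = pwTail (l.dropWhile (· == c)) (some c) := by
  intro l
  induction l with
  | nil => rfl
  | cons a t ih =>
    by_cases hac : a = c
    · subst hac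
      rw [pwTail_skip, ih, List.dropWhile_cons_of_pos (by simp)]
    · rw [List.dropWhile_cons_of_neg (by simp [hac])]

theorem pwTail_eq_groupLoop : ∀ (n : Nat) (l : List Char) (bad : Option Char),
    l.length ≤ n → pwTail l bad = pwGroupLoop (pwRuns l) bad := by
  intro n
  induction n with
  | zero =>
    intro l bad hl
    have : l = [] := List.length_eq_zero_iff.mp (Nat.le_zero.mp hl)
    subst this
    simp [pwTail, pwRuns, pwGroupLoop]
  | succ n ih =>
    intro l bad hl
    rcases l with _ | ⟨c, rest⟩
    · simp [pwTail, pwRuns, pwGroupLoop]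
    · have hlen : rest.length ≤ n := by
        simp only [List.length_cons] at hl; omega
      have hdrop_le : (rest.dropWhile (· == c)).length ≤ n :=
        le_trans (List.length_dropWhile_le _ _) hlen
      rw [pwRuns, pwGroupLoop]
      by_cases hbad : some c = bad
      · -- A skips the char; B skips the whole run (every char of it equals c = bad)
        subst hbad
        rw [pwTail_skip, pwTail_dropWhile c rest, if_pos rfl,
          ih (rest.dropWhile (· == c)) (some c) hdrop_le]
      · rw [if_neg hbad]
        rcases Nat.lt_or_ge (rest.takeWhile (· == c)).length 2 with hk2 | hk2
        · rcases rest with _ | ⟨d1, t⟩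
          · -- run length 1, string ends here
            simp [pwTail, pwRuns, pwGroupLoop]
          · by_cases hcd : c = d1
            · -- run length exactly 2 (a longer run contradicts hk2): A returns True, B sees run = 2
              subst hcd
              rw [List.takeWhile_cons_of_pos (by simp)] at hk2 ⊢
              have htw0 : (t.takeWhile (· == c)).length = 0 := by
                simp only [List.length_cons] at hk2; omega
              have htw : t.takeWhile (· == c) = [] := List.length_eq_zero_iff.mp htw0
              rw [if_neg (by rw [List.length_cons, htw0]; omega),
                if_pos (by rw [List.length_cons, htw0])]
              rcases t with _ | ⟨d2, t2⟩
              · simp [pwTail, hbad]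
              · have hd2 : ¬ c = d2 := by
                  intro hcc
                  rw [List.takeWhile_cons_of_pos (by simp [hcc.symm])] at htw
                  simp at htw
                simp [pwTail, hbad, hd2]
            · -- run length 1, next run starts with a different digit
              have htw : (d1 :: t).takeWhile (· == c) = [] :=
                List.takeWhile_cons_of_neg (by simp [Ne.symm, hcd])
              have hdw : (d1 :: t).dropWhile (· == c) = d1 :: t :=
                List.dropWhile_cons_of_neg (by simp [Ne.symm, hcd])
              rw [htw, hdw]
              rw [if_neg (by simp), if_neg (by simp), ← ih (d1 :: t) bad hlen]
              rcases t with _ | ⟨d2, t2⟩ <;> simp [pwTail, hbad, hcd]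
        · -- run length ≥ 3: A sets bad_digit and skips the run; B recurses with bad = digit
          obtain ⟨r3, hr⟩ : ∃ r3, rest = c :: c :: r3 := by
            rcases rest with _ | ⟨a, t⟩
            · simp at hk2
            · by_cases hac : a = c
              · subst hac
                rw [List.takeWhile_cons_of_pos (by simp)] at hk2
                rcases t with _ | ⟨b, t2⟩
                · simp at hk2
                · by_cases hbc : b = a
                  · subst hbc; exact ⟨t2, rfl⟩
                  · rw [List.takeWhile_cons_of_neg (by simp [hbc])] at hk2
                    simp at hk2
              · rw [List.takeWhile_cons_of_neg (by simp [hac])] at hk2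
                simp at hk2
          rw [if_pos (by omega : 3 ≤ 1 + (rest.takeWhile (· == c)).length)]
          have hA : pwTail (c :: rest) bad = pwTail rest (some c) := by
            rw [hr]; simp [pwTail, hbad]
          rw [hA, pwTail_dropWhile c rest, ih (rest.dropWhile (· == c)) (some c) hdrop_le]

-- ===== VERDICT (by name: the statement is the Claim_ definition above) =====
theorem is_password_spec : Claim_equal_is_password := by
  intro password _
  unfold Spec_is_password is_password is_password_alt
  exact (isPwLoop_eq_pwTail _ _ 0 none (List.drop_zero)).trans
    (pwTail_eq_groupLoop _ _ none le_rfl)
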